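-- pv_equiv track=rewrite | github.com/msamedina/bionetverification | ec.py | bin_rep
-- ===== SOURCE A (Python) =====
-- def bin_rep(subset, universe):
-- 	"""
-- 	Generate binary encoding of given ExCov problem
-- 		Input:
-- 			arr: subset being converted into binary representation
-- 			universe: the universe array
-- 		Output:
-- 			bin_rep: binary representation of the given subset (string)
-- 	"""
-- 	temp_bin = []
-- 	for i in range(0, len(universe)):
-- 		if universe[i] in subset:
-- 			temp_bin.append('1')
-- 		else:
-- 			temp_bin.append('0')
-- 	temp_bin.reverse()
-- 	bin_rep = ''.join(str(e) for e in temp_bin)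
-- 	return bin_rep
-- ===== SOURCE B (Python) =====
-- def bin_rep(subset, universe):
--     if not universe:
--         return ''
--     num = 0
--     weight = 1
--     for e in universe:
--         if e in subset:
--             num += weight
--         weight *= 2
--     return format(num, '0{}b'.format(len(universe)))
-- ===== Notes on version B (the rewrite author's own statement) =====
-- stated objective: alternative
-- what changed: Replaces the build-a-char-list-then-reverse-then-join pipeline by a single forward pass accumulating an integer with positional bit weights, rendered once by a zero-padded binary format call.
import Mathlib
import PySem

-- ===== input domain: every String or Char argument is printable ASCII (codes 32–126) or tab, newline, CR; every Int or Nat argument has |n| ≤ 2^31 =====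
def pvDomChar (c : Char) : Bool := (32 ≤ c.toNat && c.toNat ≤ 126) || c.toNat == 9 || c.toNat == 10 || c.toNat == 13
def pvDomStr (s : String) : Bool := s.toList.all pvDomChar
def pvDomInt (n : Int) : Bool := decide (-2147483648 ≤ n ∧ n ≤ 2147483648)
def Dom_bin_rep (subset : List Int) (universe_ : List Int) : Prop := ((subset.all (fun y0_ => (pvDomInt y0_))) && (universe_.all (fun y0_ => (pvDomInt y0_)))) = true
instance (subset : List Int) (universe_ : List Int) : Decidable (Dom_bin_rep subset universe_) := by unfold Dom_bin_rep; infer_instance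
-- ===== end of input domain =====

-- B replaces A's char-list + reverse + join by one forward pass keeping an integer
-- accumulator with positional bit weights, printed by one zero-padded binary render
-- (objective: alternative decomposition, no speed claim).

-- ===== PORT A =====
def bin_rep (subset : List Int) (universe_ : List Int) : String :=
  -- temp_bin = []; for i in range(0, len(universe)): append '1'/'0'
  let temp_bin : List Char :=
    (PySem.List.pyRange 0 (PySem.List.len universe_) 1).foldl
      (fun acc i =>
        if PySem.List.pyGetD universe_ i 0 ∈ subset then acc ++ ['1'] else acc ++ ['0'])
      []
  -- temp_bin.reverse(); ''.join(str(e) for e in temp_bin) — each e is a single char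
  String.mk temp_bin.reverse

-- ===== PORT B =====
-- exact port of format(num, '0{n}b') for the values reached here (0 ≤ num < 2^n):
-- n binary digits, most significant first
def binPadChars : Nat → Nat → List Char
  | 0, _ => []
  | n + 1, v => binPadChars n (v / 2) ++ [if v % 2 = 1 then '1' else '0']

def bin_rep_alt (subset : List Int) (universe_ : List Int) : String :=
  if universe_.isEmpty then "" else
    let p := universe_.foldl
      (fun (acc : Nat × Nat) e =>
        (if e ∈ subset then acc.1 + acc.2 else acc.1, acc.2 * 2)) (0, 1)
    String.mk (binPadChars universe_.length p.1)

-- ===== PRECONDITION & SPEC =====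
def Spec_bin_rep (subset : List Int) (universe_ : List Int) (out : String) : Prop := out = bin_rep_alt subset universe_
instance (subset : List Int) (universe_ : List Int) (out : String) : Decidable (Spec_bin_rep subset universe_ out) := by unfold Spec_bin_rep; infer_instance

-- ===== CLAIM (what is proved, stated in full; the proofs are below) =====
def Claim_equal_bin_rep : Prop := ∀ (subset : List Int) (universe_ : List Int), Dom_bin_rep subset universe_ → Spec_bin_rep subset universe_ (bin_rep subset universe_)

-- ===== LEMMAS AND PROOFS =====

-- the membership bit of one element
def pvBit (subset : List Int) (e : Int) : Nat := if e ∈ subset then 1 else 0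

-- the accumulated integer, LSB = first element
def pvVal (subset : List Int) : List Int → Nat
  | [] => 0
  | x :: t => pvBit subset x + 2 * pvVal subset t

lemma pvFold_eq (s : List Int) : ∀ (u : List Int) (a w : Nat),
    u.foldl (fun (acc : Nat × Nat) e =>
      (if e ∈ s then acc.1 + acc.2 else acc.1, acc.2 * 2)) (a, w)
      = (a + w * pvVal s u, w * 2 ^ u.length) := by
  intro u
  induction u with
  | nil => intro a w; simp [pvVal]
  | cons x t ih =>
      intro a w
      simp only [List.foldl_cons]
      rw [ih]
      simp only [pvVal, pvBit]
      by_cases h : x ∈ s <;>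
        simp only [h, if_pos, if_neg, not_false_iff, List.length_cons, pow_succ,
          Prod.mk.injEq] <;> constructor <;> ring

lemma binPadChars_val (s : List Int) : ∀ u : List Int,
    binPadChars u.length (pvVal s u)
      = (u.map (fun e => if e ∈ s then '1' else '0')).reverse := by
  intro u
  induction u with
  | nil => simp [binPadChars]
  | cons x t ih =>
      have hb : pvBit s x ≤ 1 := by unfold pvBit; split <;> omega
      simp only [List.length_cons, binPadChars, pvVal, List.map_cons, List.reverse_cons]
      have h2 : (pvBit s x + 2 * pvVal s t) / 2 = pvVal s t := by omega
      have h3 : (pvBit s x + 2 * pvVal s t) % 2 = pvBit s x := by omega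
      rw [h2, h3, ih]
      by_cases h : x ∈ s <;> simp [pvBit, h]

lemma bin_rep_eq (s u : List Int) :
    bin_rep s u = String.mk ((u.map (fun e => if e ∈ s then '1' else '0')).reverse) := by
  unfold bin_rep
  rw [PySem.List.foldl_pyRange_zero_pyGetD u 0
        (fun (acc : List Char) e => if e ∈ s then acc ++ ['1'] else acc ++ ['0']) []]
  have : (fun (acc : List Char) (e : Int) => if e ∈ s then acc ++ ['1'] else acc ++ ['0'])
       = fun (acc : List Char) e => acc ++ [if e ∈ s then '1' else '0'] := by
    funext acc e; by_cases h : e ∈ s <;> simp [h]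
  rw [this, PySem.List.foldl_append_singleton_eq_map]
  simp

lemma bin_rep_alt_eq (s u : List Int) :
    bin_rep_alt s u = String.mk ((u.map (fun e => if e ∈ s then '1' else '0')).reverse) := by
  unfold bin_rep_alt
  by_cases h : u = []
  · subst h; rfl
  · rw [if_neg (by simp [h])]
    rw [pvFold_eq s u 0 1]
    simp only [Nat.zero_add, Nat.one_mul]
    rw [binPadChars_val]

-- ===== VERDICT (by name: the statement is the Claim_ definition above) =====
theorem bin_rep_spec : Claim_equal_bin_rep := by
  intro s u _
  unfold Spec_bin_rep
  rw [bin_rep_eq, bin_rep_alt_eq]
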